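-- pv_equiv track=rewrite | github.com/psytechlab/kitoboy-ml | src/contrib/topmine/topmine.py | _process_partitioned_docs
-- ===== SOURCE A (Python) =====
-- def _process_partitioned_docs(partitioned_docs_):
--     vocab = {}
--     index_vocab = []
--     partitioned_docs = []
--
--     word_counter = 0
--     for document_index, document in enumerate(partitioned_docs_):
--         document_of_phrases = []
--         for phrase in document:
--             phrases_of_words = []
--             for word in phrase.split():
--                 if word not in vocab:
--                     vocab[word] = word_counter
--                     index_vocab.append(word)
--                     word_counter += 1
--                 phrases_of_words.append(vocab[word])
--             document_of_phrases.append(phrases_of_words)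
--         partitioned_docs.append(document_of_phrases)
--     return partitioned_docs, index_vocab
-- ===== SOURCE B (Python) =====
-- def _process_partitioned_docs(partitioned_docs_):
--     # stage 1: flatten every word in reading order
--     words = [w for doc in partitioned_docs_ for phrase in doc for w in phrase.split()]
--     # stage 2: vocabulary = first occurrences, in order
--     index_vocab = list(dict.fromkeys(words))
--     vocab = {w: i for i, w in enumerate(index_vocab)}
--     # stage 3: map every word to its id
--     partitioned_docs = [
--         [[vocab[w] for w in phrase.split()] for phrase in doc]
--         for doc in partitioned_docs_
--     ]
--     return partitioned_docs, index_vocab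
-- ===== Notes on version B (the rewrite author's own statement) =====
-- stated objective: alternative
-- what changed: B replaces A's single interleaved pass (dict + parallel list + counter updated per word) by three staged passes: flatten all words, deduplicate once with dict.fromkeys to get the vocabulary, then map every phrase through the finished vocab dict by comprehensions.
import Mathlib
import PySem

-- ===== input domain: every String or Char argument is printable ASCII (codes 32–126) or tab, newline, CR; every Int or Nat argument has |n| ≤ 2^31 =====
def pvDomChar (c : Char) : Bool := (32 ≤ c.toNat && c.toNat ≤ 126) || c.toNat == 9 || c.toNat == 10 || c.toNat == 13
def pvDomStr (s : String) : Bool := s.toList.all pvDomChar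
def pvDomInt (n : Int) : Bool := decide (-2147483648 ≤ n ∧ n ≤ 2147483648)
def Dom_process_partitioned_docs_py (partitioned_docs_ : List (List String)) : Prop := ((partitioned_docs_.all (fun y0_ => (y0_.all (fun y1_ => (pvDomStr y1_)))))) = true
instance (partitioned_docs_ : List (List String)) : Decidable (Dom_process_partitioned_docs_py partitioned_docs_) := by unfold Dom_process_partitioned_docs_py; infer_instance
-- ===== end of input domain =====

-- B replaces A's single interleaved pass (dict + parallel list + counter) by three staged
-- passes: flatten the words, deduplicate once, build the vocab, then map the phrases. Same cost.

-- ===== PORT A =====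
-- State of A's loops: (vocab, index_vocab, word_counter)
abbrev pvStA := PySem.Dict String Int × List String × Int

-- inner 'for word in phrase.split()' body of A
def pvStepAw (st : pvStA × List Int) (word : String) : pvStA × List Int :=
  let st' : pvStA :=
    if (st.1.1.contains word) then st.1
    else (st.1.1.insert word st.1.2.2, st.1.2.1 ++ [word], st.1.2.2 + 1)
  (st', st.2 ++ [st'.1.getD word 0])

-- 'for phrase in document' body of A
def pvStepAp (st : pvStA × List (List Int)) (phrase : String) : pvStA × List (List Int) :=
  let r := (PySem.Str.split₀ phrase).foldl pvStepAw (st.1, [])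
  (r.1, st.2 ++ [r.2])

-- 'for document_index, document in enumerate(...)' body of A (the index is unused)
def pvStepAd (st : pvStA × List (List (List Int))) (doc : Int × List String) : pvStA × List (List (List Int)) :=
  let r := doc.2.foldl pvStepAp (st.1, [])
  (r.1, st.2 ++ [r.2])

def process_partitioned_docs_py (partitioned_docs_ : List (List String)) : List (List (List Int)) × List String :=
  let r := (PySem.List.enumerate partitioned_docs_).foldl pvStepAd ((PySem.Dict.empty, [], 0), [])
  (r.2, r.1.2.1)

-- ===== PORT B =====
-- words = [w for doc in partitioned_docs_ for phrase in doc for w in phrase.split()]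
def pvWordsB (pd : List (List String)) : List String :=
  pd.flatMap (fun doc => doc.flatMap (fun phrase => PySem.Str.split₀ phrase))

-- vocab = {w: i for i, w in enumerate(index_vocab)}
def pvVocabB (iv : List String) : PySem.Dict String Int :=
  (PySem.List.enumerate iv).foldl (fun d p => d.insert p.2 p.1) PySem.Dict.empty

def process_partitioned_docs_py_alt (partitioned_docs_ : List (List String)) : List (List (List Int)) × List String :=
  -- index_vocab = list(dict.fromkeys(words))
  let index_vocab := PySem.List.dedup (pvWordsB partitioned_docs_)
  let vocab := pvVocabB index_vocab
  -- vocab[w]: every word occurs in index_vocab, so get? is always some here; getD 0 is exact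
  (partitioned_docs_.map (fun doc => doc.map (fun phrase =>
      (PySem.Str.split₀ phrase).map (fun w => (vocab.get? w).getD 0))),
   index_vocab)

-- ===== PRECONDITION & SPEC =====
def Spec_process_partitioned_docs_py (partitioned_docs_ : List (List String)) (out : List (List (List Int)) × List String) : Prop := out = process_partitioned_docs_py_alt partitioned_docs_
instance (partitioned_docs_ : List (List String)) (out : List (List (List Int)) × List String) : Decidable (Spec_process_partitioned_docs_py partitioned_docs_ out) := by unfold Spec_process_partitioned_docs_py; infer_instance

-- ===== CLAIM =====
def Claim_equal_process_partitioned_docs_py : Prop := ∀ (partitioned_docs_ : List (List String)), Dom_process_partitioned_docs_py partitioned_docs_ → Spec_process_partitioned_docs_py partitioned_docs_ (process_partitioned_docs_py partitioned_docs_)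

-- ===== LEMMAS AND PROOFS =====

-- the id B assigns to w relative to a vocabulary list l
def pvId (l : List String) (w : String) : Int := ((pvVocabB l).get? w).getD 0

theorem pvVocabB_get?_aux (l : List String) (s : Int) (d : PySem.Dict String Int)
    (hn : l.Nodup) (w : String) :
    ((PySem.List.enumerate l s).foldl (fun d p => d.insert p.2 p.1) d).get? w
      = if w ∈ l then some (s + (l.idxOf w : Int)) else d.get? w := by
  induction l generalizing s d with
  | nil => simp [PySem.List.enumerate_nil]
  | cons x xs ih =>
    rw [PySem.List.enumerate_cons]
    simp only [List.foldl_cons]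
    rw [ih (s+1) (d.insert x s) (List.Nodup.of_cons hn)]
    by_cases hwx : w = x
    · subst hwx
      have hnm : w ∉ xs := by simpa using (List.nodup_cons.mp hn).1
      simp [hnm, PySem.Dict.get?_insert_self, List.idxOf_cons_self]
    · by_cases hmem : w ∈ xs
      · simp only [hmem, if_true, List.mem_cons, hwx, false_or, if_true]
        rw [List.idxOf_cons_ne _ (by simpa using fun h => hwx h.symm)]
        congr 1
        push_cast
        ring
      · simp [hmem, hwx, PySem.Dict.get?_insert_of_ne _ _ hwx]

theorem pvAdd_eq (l : List String) (w : String) :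
    PySem.Set.add l w = if w ∈ l then l else l ++ [w] := by
  simp [PySem.Set.add, PySem.Set.contains]

theorem pvVocabB_get? (l : List String) (hn : l.Nodup) (w : String) :
    (pvVocabB l).get? w = if w ∈ l then some ((l.idxOf w : Int)) else none := by
  unfold pvVocabB
  rw [pvVocabB_get?_aux l 0 PySem.Dict.empty hn w]
  simp [PySem.Dict.get?_empty]

-- Set.update only appends
theorem pvUpdate_ext (ws l : List String) : ∃ t, PySem.Set.update l ws = l ++ t := by
  induction ws generalizing l with
  | nil => exact ⟨[], by simp [PySem.Set.update]⟩
  | cons w ws ih =>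
    have hcons : PySem.Set.update l (w :: ws) = PySem.Set.update (PySem.Set.add l w) ws := by
      simp [PySem.Set.update]
    obtain ⟨t, ht⟩ := ih (PySem.Set.add l w)
    by_cases hc : w ∈ l
    · exact ⟨t, by rw [hcons, ht, pvAdd_eq]; simp [hc]⟩
    · exact ⟨w :: t, by rw [hcons, ht, pvAdd_eq]; simp [hc]⟩

theorem pvId_mono (l t : List String) (w : String) (hn : (l ++ t).Nodup) (hw : w ∈ l) :
    pvId (l ++ t) w = pvId l w := by
  unfold pvId
  rw [pvVocabB_get? _ hn w, pvVocabB_get? _ ((List.nodup_append.mp hn).1) w]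
  simp [hw, List.mem_append, List.idxOf_append]

-- every id A emits for a word agrees with the FINAL vocabulary F
theorem pvWordFold (ws l : List String) (out : List Int) (F : List String)
    (hn : l.Nodup) (hF : F.Nodup) (ht : ∃ t, F = PySem.Set.update l ws ++ t) :
    ws.foldl pvStepAw ((pvVocabB l, l, (l.length : Int)), out)
      = ((pvVocabB (PySem.Set.update l ws), PySem.Set.update l ws,
          ((PySem.Set.update l ws).length : Int)),
         out ++ ws.map (fun w => pvId F w)) := by
  induction ws generalizing l out with
  | nil => simp only [List.foldl_nil, PySem.Set.update, List.map_nil, List.append_nil]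
  | cons w ws ih =>
    have hupd : PySem.Set.update l (w :: ws) = PySem.Set.update (PySem.Set.add l w) ws := by
      simp [PySem.Set.update]
    have hFl : ∃ t, F = l ++ t := by
      obtain ⟨t, htF⟩ := ht
      obtain ⟨t', ht'⟩ := pvUpdate_ext (w :: ws) l
      exact ⟨t' ++ t, by rw [htF, ht', List.append_assoc]⟩
    have hcont : (pvVocabB l).contains w = decide (w ∈ l) := by
      rw [PySem.Dict.contains_eq_isSome_get?, pvVocabB_get? l hn w]
      by_cases h : w ∈ l <;> simp [h]
    simp only [List.foldl_cons]
    by_cases hw : w ∈ l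
    · -- word already in vocab: state unchanged, emit its existing id
      have hadd : PySem.Set.add l w = l := by
        rw [pvAdd_eq]; simp [hw]
      have hstep : pvStepAw ((pvVocabB l, l, (l.length : Int)), out) w
          = ((pvVocabB l, l, (l.length : Int)), out ++ [pvId F w]) := by
        obtain ⟨t, htF⟩ := hFl
        have hid : pvId F w = (l.idxOf w : Int) := by
          rw [htF, pvId_mono l t w (htF ▸ hF) hw]
          unfold pvId
          rw [pvVocabB_get? l hn w]
          simp [hw]
        simp [pvStepAw, hcont, hw, PySem.Dict.getD_eq_get?_getD, pvVocabB_get? l hn w, hid]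
      rw [hstep, hupd, hadd, ih l (out ++ [pvId F w]) hn (by rw [← hadd, ← hupd]; exact ht)]
      simp
    · -- new word: insert with id = current size
      have hadd : PySem.Set.add l w = l ++ [w] := by
        rw [pvAdd_eq]; simp [hw]
      have hvic : pvVocabB (l ++ [w]) = (pvVocabB l).insert w (l.length : Int) := by
        unfold pvVocabB
        rw [PySem.List.enumerate_append, List.foldl_append]
        simp [PySem.List.enumerate_cons, PySem.List.enumerate_nil]
      have hnlw : (l ++ [w]).Nodup := by
        have hdj : List.Disjoint l [w] := by
          intro a ha hb
          rw [List.mem_singleton] at hb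
          exact hw (hb ▸ ha)
        exact hn.append (by simp) hdj
      have hFlw : ∃ t, F = (l ++ [w]) ++ t := by
        obtain ⟨t, htF⟩ := ht
        obtain ⟨t', ht'⟩ := pvUpdate_ext ws (PySem.Set.add l w)
        exact ⟨t' ++ t, by rw [htF, hupd, ht', hadd, List.append_assoc]⟩
      have hid : pvId F w = (l.length : Int) := by
        obtain ⟨t, htF⟩ := hFlw
        rw [htF, pvId_mono (l ++ [w]) t w (htF ▸ hF) (by simp)]
        unfold pvId
        rw [pvVocabB_get? _ hnlw w]
        simp [List.idxOf_append, hw]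
      have hstep : pvStepAw ((pvVocabB l, l, (l.length : Int)), out) w
          = ((pvVocabB (l ++ [w]), l ++ [w], ((l ++ [w]).length : Int)), out ++ [pvId F w]) := by
        simp only [pvStepAw, hcont, hw, decide_false, Bool.false_eq_true, if_false]
        rw [hvic]
        simp [PySem.Dict.getD_insert_self, hid]
      rw [hstep, hupd, ← hadd,
        ih (PySem.Set.add l w) (out ++ [pvId F w]) (hadd ▸ hnlw)
          (by rw [← hupd]; exact ht)]
      simp [hadd]

theorem pvPhraseFold (ps : List String) (l : List String) (out : List (List Int))
    (F : List String) (hn : l.Nodup) (hF : F.Nodup)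
    (ht : ∃ t, F = PySem.Set.update l (ps.flatMap (fun p => PySem.Str.split₀ p)) ++ t) :
    ps.foldl pvStepAp ((pvVocabB l, l, (l.length : Int)), out)
      = ((pvVocabB (PySem.Set.update l (ps.flatMap (fun p => PySem.Str.split₀ p))),
          PySem.Set.update l (ps.flatMap (fun p => PySem.Str.split₀ p)),
          ((PySem.Set.update l (ps.flatMap (fun p => PySem.Str.split₀ p))).length : Int)),
         out ++ ps.map (fun p => (PySem.Str.split₀ p).map (fun w => pvId F w))) := by
  induction ps generalizing l out with
  | nil => simp only [List.foldl_nil, List.flatMap_nil, PySem.Set.update, List.map_nil, List.append_nil]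
  | cons p ps ih =>
    have hsplit : PySem.Set.update l ((p :: ps).flatMap (fun p => PySem.Str.split₀ p))
        = PySem.Set.update (PySem.Set.update l (PySem.Str.split₀ p))
            (ps.flatMap (fun p => PySem.Str.split₀ p)) := by
      simp [PySem.Set.update, List.flatMap_cons, List.foldl_append]
    have ht1 : ∃ t, F = PySem.Set.update l (PySem.Str.split₀ p) ++ t := by
      obtain ⟨t, htF⟩ := ht
      obtain ⟨t', ht'⟩ :=
        pvUpdate_ext (ps.flatMap (fun p => PySem.Str.split₀ p))
          (PySem.Set.update l (PySem.Str.split₀ p))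
      exact ⟨t' ++ t, by rw [htF, hsplit, ht', List.append_assoc]⟩
    simp only [List.foldl_cons, pvStepAp]
    rw [pvWordFold (PySem.Str.split₀ p) l [] F hn hF ht1]
    simp only [List.nil_append]
    rw [hsplit, ih (PySem.Set.update l (PySem.Str.split₀ p)) _
      (PySem.Set.nodup_update l (PySem.Str.split₀ p) hn) (by rw [← hsplit]; exact ht)]
    simp

theorem pvDocFold (ds : List (List String)) (k : Int) (l : List String)
    (out : List (List (List Int))) (F : List String) (hn : l.Nodup) (hF : F.Nodup)
    (ht : ∃ t, F = PySem.Set.update l (pvWordsB ds) ++ t) :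
    (PySem.List.enumerate ds k).foldl pvStepAd ((pvVocabB l, l, (l.length : Int)), out)
      = ((pvVocabB (PySem.Set.update l (pvWordsB ds)), PySem.Set.update l (pvWordsB ds),
          ((PySem.Set.update l (pvWordsB ds)).length : Int)),
         out ++ ds.map (fun doc => doc.map (fun p =>
            (PySem.Str.split₀ p).map (fun w => pvId F w)))) := by
  induction ds generalizing k l out with
  | nil => simp only [PySem.List.enumerate_nil, List.foldl_nil, pvWordsB, List.flatMap_nil, PySem.Set.update, List.map_nil, List.append_nil]
  | cons d ds ih =>
    have hsplit : PySem.Set.update l (pvWordsB (d :: ds))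
        = PySem.Set.update (PySem.Set.update l (d.flatMap (fun p => PySem.Str.split₀ p)))
            (pvWordsB ds) := by
      simp [pvWordsB, PySem.Set.update, List.flatMap_cons, List.foldl_append]
    have ht1 : ∃ t, F = PySem.Set.update l (d.flatMap (fun p => PySem.Str.split₀ p)) ++ t := by
      obtain ⟨t, htF⟩ := ht
      obtain ⟨t', ht'⟩ :=
        pvUpdate_ext (pvWordsB ds)
          (PySem.Set.update l (d.flatMap (fun p => PySem.Str.split₀ p)))
      exact ⟨t' ++ t, by rw [htF, hsplit, ht', List.append_assoc]⟩
    rw [PySem.List.enumerate_cons]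
    simp only [List.foldl_cons, pvStepAd]
    rw [pvPhraseFold d l [] F hn hF ht1]
    simp only [List.nil_append]
    rw [hsplit, ih (k + 1) _ _
      (PySem.Set.nodup_update l _ hn) (by rw [← hsplit]; exact ht)]
    simp

-- ===== VERDICT =====
theorem process_partitioned_docs_py_spec : Claim_equal_process_partitioned_docs_py := by
  intro pd _
  unfold Spec_process_partitioned_docs_py process_partitioned_docs_py process_partitioned_docs_py_alt
  have hofl : PySem.Set.update ([] : List String) (pvWordsB pd) = PySem.Set.ofList (pvWordsB pd) := by
    rw [PySem.Set.ofList_eq_foldl]; rfl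
  have hF : (PySem.Set.update ([] : List String) (pvWordsB pd)).Nodup := by
    rw [hofl]; exact PySem.Set.nodup_ofList _
  have hbase : ((PySem.Dict.empty : PySem.Dict String Int), ([] : List String), (0 : Int))
      = (pvVocabB [], [], (([] : List String).length : Int)) := by
    simp [pvVocabB, PySem.List.enumerate_nil]
  rw [hbase, pvDocFold pd 0 [] [] _ List.nodup_nil hF ⟨[], by simp⟩]
  simp only [List.nil_append, PySem.List.dedup_eq_ofList, ← hofl]
  rfl
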